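-- pv_equiv track=rewrite | github.com/RuddyMoriarty/moriarty-cfo | cfo-reporting/scripts/cfo_unified_dashboard.py | render_routines_block
-- ===== SOURCE A (Python) =====
-- def render_routines_block(routines_data: dict | None) -> str:
--     if not routines_data or not routines_data.get("routines"):
--         return '<div class="empty">Aucune routine programmee. Lancer <code>./cfo routine-compute --siren X</code></div>'
--
--     routines = routines_data["routines"]
--     active = [r for r in routines if r.get("etat") in ("actif", "scheduled")]
--     if not active:
--         return f'<div class="empty">{len(routines)} routine(s) au catalogue, aucune active.</div>'
--
--     # Prochaine a lancer (date la plus proche)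
--     sorted_active = sorted(
--         [r for r in active if r.get("next_due")],
--         key=lambda r: r.get("next_due", "9999-12-31"),
--     )
--     lines = [f'<p><b>{len(active)}</b> routine(s) active(s) sur {len(routines)} au catalogue.</p>']
--     if sorted_active:
--         next_r = sorted_active[0]
--         lines.append(
--             f'<p style="font-size:12px; margin-top:4px;">Prochaine : '
--             f'<b>{next_r.get("label","?")}</b> le {next_r.get("next_due","?")}</p>'
--         )
--     return "".join(lines)
-- ===== SOURCE B (Python) =====
-- # Single pass over the routines: count total/active and track the earliest-due
-- # active routine with a running minimum, instead of building intermediate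
-- # filtered lists and sorting.
-- def render_routines_block(routines_data: dict | None) -> str:
--     if not routines_data or not routines_data.get("routines"):
--         return '<div class="empty">Aucune routine programmee. Lancer <code>./cfo routine-compute --siren X</code></div>'
--
--     total = 0
--     n_active = 0
--     best = None  # active routine with the smallest truthy next_due (first wins)
--     for r in routines_data["routines"]:
--         total += 1
--         if r.get("etat") in ("actif", "scheduled"):
--             n_active += 1
--             due = r.get("next_due")
--             if due and (best is None or due < best.get("next_due", "")):
--                 best = r
--
--     if n_active == 0:
--         return f'<div class="empty">{total} routine(s) au catalogue, aucune active.</div>'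
--
--     html = f'<p><b>{n_active}</b> routine(s) active(s) sur {total} au catalogue.</p>'
--     if best is not None:
--         html += (
--             f'<p style="font-size:12px; margin-top:4px;">Prochaine : '
--             f'<b>{best.get("label","?")}</b> le {best.get("next_due","?")}</p>'
--         )
--     return html
-- ===== Notes on version B (the rewrite author's own statement) =====
-- stated objective: alternative
-- what changed: Replaces A's build-two-filtered-lists-then-sort pipeline with a single pass over the routines that counts total/active and tracks the earliest-due routine as a running minimum.
import Mathlib
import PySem

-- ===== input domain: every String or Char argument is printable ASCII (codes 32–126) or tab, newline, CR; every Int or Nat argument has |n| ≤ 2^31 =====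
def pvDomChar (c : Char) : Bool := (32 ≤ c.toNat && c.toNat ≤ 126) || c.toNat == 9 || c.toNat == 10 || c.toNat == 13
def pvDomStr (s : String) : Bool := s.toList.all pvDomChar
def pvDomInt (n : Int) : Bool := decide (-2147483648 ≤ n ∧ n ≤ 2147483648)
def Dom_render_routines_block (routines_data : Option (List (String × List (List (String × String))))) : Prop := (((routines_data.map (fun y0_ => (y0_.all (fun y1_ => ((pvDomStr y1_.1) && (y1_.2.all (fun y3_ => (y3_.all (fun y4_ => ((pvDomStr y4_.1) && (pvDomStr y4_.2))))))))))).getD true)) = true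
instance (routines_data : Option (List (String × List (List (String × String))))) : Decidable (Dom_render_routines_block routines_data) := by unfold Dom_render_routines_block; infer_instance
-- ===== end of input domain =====

-- B replaces A's filter-lists-then-sort pipeline by a single pass that counts and
-- tracks the running minimum next_due; same return value on every input.

-- ===== PORT A =====
-- common literal: the "no routines" message both programs return on empty input
def rrbEmptyMsg : String := "<div class=\"empty\">Aucune routine programmee. Lancer <code>./cfo routine-compute --siren X</code></div>"

-- r.get("etat") in ("actif", "scheduled")
def rrbActive (r : List (String × String)) : Bool :=
  (PySem.Dict.ofList r).get? "etat" == some "actif" ||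
  (PySem.Dict.ofList r).get? "etat" == some "scheduled"

-- truthiness of r.get("next_due")
def rrbDated (r : List (String × String)) : Bool :=
  match (PySem.Dict.ofList r).get? "next_due" with
  | some s => s ≠ ""
  | none => false

-- A's sort key: r.get("next_due", "9999-12-31")
def rrbKeyA (r : List (String × String)) : String :=
  (PySem.Dict.ofList r).getD "next_due" "9999-12-31"

-- the second <p> line, shared text of both f-strings
def rrbNextLine (r : List (String × String)) : String :=
  "<p style=\"font-size:12px; margin-top:4px;\">Prochaine : <b>" ++
  (PySem.Dict.ofList r).getD "label" "?" ++ "</b> le " ++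
  (PySem.Dict.ofList r).getD "next_due" "?" ++ "</p>"

def render_routines_block (routines_data : Option (List (String × List (List (String × String))))) : String :=
  match routines_data with
  | none => rrbEmptyMsg
  | some pairs =>
    if pairs.isEmpty then rrbEmptyMsg
    else match (PySem.Dict.ofList pairs).get? "routines" with
      | none => rrbEmptyMsg
      | some [] => rrbEmptyMsg
      | some routines =>
        let active := routines.filter rrbActive
        if active.isEmpty then
          "<div class=\"empty\">" ++ PySem.Int.toStr (routines.length : Int) ++
            " routine(s) au catalogue, aucune active.</div>"
        else
          let sorted_active := PySem.List.sorted (active.filter rrbDated) rrbKeyA false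
          let lines := ["<p><b>" ++ PySem.Int.toStr (active.length : Int) ++
            "</b> routine(s) active(s) sur " ++ PySem.Int.toStr (routines.length : Int) ++
            " au catalogue.</p>"]
          let lines := match sorted_active with
            | [] => lines
            | next_r :: _ => lines ++ [rrbNextLine next_r]
          PySem.Str.join "" lines

-- ===== PORT B =====
-- B-side copies of the message / predicate / line helpers (not shared with port A)
def rrbEmptyMsgB : String := "<div class=\"empty\">Aucune routine programmee. Lancer <code>./cfo routine-compute --siren X</code></div>"

def rrbActiveB (r : List (String × String)) : Bool :=
  (PySem.Dict.ofList r).get? "etat" == some "actif" ||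
  (PySem.Dict.ofList r).get? "etat" == some "scheduled"

def rrbNextLineB (r : List (String × String)) : String :=
  "<p style=\"font-size:12px; margin-top:4px;\">Prochaine : <b>" ++
  (PySem.Dict.ofList r).getD "label" "?" ++ "</b> le " ++
  (PySem.Dict.ofList r).getD "next_due" "?" ++ "</p>"

-- one step of B's for-loop: state (total, n_active, best)
def rrbStep (st : Int × Int × Option (List (String × String))) (r : List (String × String)) :
    Int × Int × Option (List (String × String)) :=
  let total := st.1 + 1
  if rrbActiveB r then
    let nact := st.2.1 + 1
    match (PySem.Dict.ofList r).get? "next_due" with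
    | none => (total, nact, st.2.2)
    | some due =>
      if due = "" then (total, nact, st.2.2)
      else match st.2.2 with
        | none => (total, nact, some r)
        | some b =>
          if due < (PySem.Dict.ofList b).getD "next_due" "" then (total, nact, some r)
          else (total, nact, some b)
  else (total, st.2.1, st.2.2)

def render_routines_block_alt (routines_data : Option (List (String × List (List (String × String))))) : String :=
  let pairs := routines_data.getD []
  let routines := (PySem.Dict.ofList pairs).getD "routines" []
  if pairs.isEmpty || routines.isEmpty then rrbEmptyMsgB
  else
    let st := routines.foldl rrbStep (0, 0, none)
    if st.2.1 = 0 then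
      "<div class=\"empty\">" ++ PySem.Int.toStr st.1 ++
        " routine(s) au catalogue, aucune active.</div>"
    else
      let html := "<p><b>" ++ PySem.Int.toStr st.2.1 ++
        "</b> routine(s) active(s) sur " ++ PySem.Int.toStr st.1 ++
        " au catalogue.</p>"
      (st.2.2).elim html (fun b => html ++ rrbNextLineB b)

-- ===== PRECONDITION & SPEC =====
def Spec_render_routines_block (routines_data : Option (List (String × List (List (String × String))))) (out : String) : Prop := out = render_routines_block_alt routines_data
instance (routines_data : Option (List (String × List (List (String × String))))) (out : String) : Decidable (Spec_render_routines_block routines_data out) := by unfold Spec_render_routines_block; infer_instance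

-- ===== CLAIM (what is proved, stated in full; the proofs are below) =====
def Claim_equal_render_routines_block : Prop := ∀ (routines_data : Option (List (String × List (List (String × String))))), Dom_render_routines_block routines_data → Spec_render_routines_block routines_data (render_routines_block routines_data)

-- ===== LEMMAS AND PROOFS =====

-- the two message copies coincide (needed to relate the ports)
theorem rrbEmptyMsgB_eq : rrbEmptyMsgB = rrbEmptyMsg := rfl

-- B's key on a dated routine: its stored next_due
def rrbKeyB (r : List (String × String)) : String :=
  (PySem.Dict.ofList r).getD "next_due" ""

-- head of insertBy
theorem rrb_head_insertBy {α : Type} (before : α → α → Bool) (x : α) (l : List α) :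
    (PySem.List.insertBy before x l).head? =
      some (match l.head? with
            | none => x
            | some y => if before x y then x else y) := by
  cases l with
  | nil => rfl
  | cons y ys =>
    simp only [PySem.List.insertBy]
    by_cases h : before x y <;> simp [h]

-- head of the insertion-sort fold is the running first-minimum
theorem rrb_head_foldl_insertBy {α : Type} (before : α → α → Bool) (xs : List α) (acc : List α) :
    (xs.foldl (fun a x => PySem.List.insertBy before x a) acc).head? =
      xs.foldl (fun m x => some (match m with
                                 | none => x
                                 | some y => if before x y then x else y)) acc.head? := by
  induction xs generalizing acc with
  | nil => rfl
  | cons x xs ih =>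
    simp only [List.foldl_cons]
    rw [ih, rrb_head_insertBy]

-- head of Python's stable sort is Python's min (first extremal element)
theorem rrb_head_sorted {α : Type} (xs : List α) (key : α → String) :
    (PySem.List.sorted xs key false).head? = PySem.List.min? xs key := by
  rw [PySem.List.sorted_eq_foldl_insertBy, rrb_head_foldl_insertBy]
  simp only [PySem.List.min?, List.head?_nil]
  congr 1
  funext m x
  cases m with
  | none => rfl
  | some y =>
    dsimp only
    split <;> simp_all

-- min?'s fold step for a key
def rrbMinStep {α : Type} (key : α → String) (m : Option α) (x : α) : Option α :=
  match m with
  | none => some x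
  | some y => if key x < key y then some x else some y

theorem rrb_min?_eq_foldl {α : Type} (xs : List α) (key : α → String) :
    PySem.List.min? xs key = xs.foldl (rrbMinStep key) none := rfl

-- min? only looks at the key on elements of the list
theorem rrb_minStep_congr_aux {α : Type} (k1 k2 : α → String) (xs : List α) :
    ∀ (acc : Option α), (∀ x ∈ xs, k1 x = k2 x) → (∀ m, acc = some m → k1 m = k2 m) →
    xs.foldl (rrbMinStep k1) acc = xs.foldl (rrbMinStep k2) acc := by
  induction xs with
  | nil => intro acc _ _; rfl
  | cons x xs ih =>
    intro acc h hacc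
    have hx : k1 x = k2 x := h x (by simp)
    simp only [List.foldl_cons]
    have hstep : rrbMinStep k1 acc x = rrbMinStep k2 acc x := by
      cases acc with
      | none => rfl
      | some m => simp [rrbMinStep, hx, hacc m rfl]
    rw [hstep]
    apply ih
    · intro y hy; exact h y (by simp [hy])
    · intro m hm
      cases acc with
      | none => simp [rrbMinStep] at hm; subst hm; exact hx
      | some y =>
        simp only [rrbMinStep] at hm
        split at hm <;> (cases hm; first | exact hx | exact hacc _ rfl)

theorem rrb_min?_congr {α : Type} (k1 k2 : α → String) (xs : List α)
    (h : ∀ x ∈ xs, k1 x = k2 x) :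
    PySem.List.min? xs k1 = PySem.List.min? xs k2 := by
  rw [rrb_min?_eq_foldl, rrb_min?_eq_foldl]
  exact rrb_minStep_congr_aux k1 k2 xs none h (by intro m hm; cases hm)

-- B's fold computes (length, active count, min? of the dated active routines)
theorem rrb_foldl_step (rs : List (List (String × String))) (t n : Int)
    (b : Option (List (String × String))) :
    rs.foldl rrbStep (t, n, b) =
      (t + rs.length, n + ((rs.filter rrbActive).length : Int),
       ((rs.filter rrbActive).filter rrbDated).foldl (rrbMinStep rrbKeyB) b) := by
  induction rs generalizing t n b with
  | nil => simp
  | cons r rs ih =>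
    simp only [List.foldl_cons, List.filter_cons]
    by_cases ha : rrbActive r
    all_goals have haB : rrbActiveB r = rrbActive r := rfl
    · rcases hd : (PySem.Dict.ofList r).get? "next_due" with _ | due
      · have hdated : rrbDated r = false := by simp [rrbDated, hd]
        have hstep : rrbStep (t, n, b) r = (t + 1, n + 1, b) := by
          simp [rrbStep, haB, ha, hd]
        rw [hstep, ih]
        simp [ha, hdated]
        omega
      · by_cases he : due = ""
        · have hdated : rrbDated r = false := by simp [rrbDated, hd, he]
          have hstep : rrbStep (t, n, b) r = (t + 1, n + 1, b) := by
            simp [rrbStep, haB, ha, hd, he]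
          rw [hstep, ih]
          simp [ha, hdated]
          omega
        · have hdated : rrbDated r = true := by simp [rrbDated, hd, he]
          have hk : rrbKeyB r = due := by simp [rrbKeyB, PySem.Dict.getD, hd]
          have hstep : rrbStep (t, n, b) r = (t + 1, n + 1, rrbMinStep rrbKeyB b r) := by
            cases b with
            | none => simp [rrbStep, haB, ha, hd, he, rrbMinStep]
            | some b' =>
              simp only [rrbStep, haB, ha, hd, he, rrbMinStep, hk, if_true, if_false]
              show (if due < (PySem.Dict.ofList b').getD "next_due" "" then _ else _) = _
              rw [show rrbKeyB b' = (PySem.Dict.ofList b').getD "next_due" "" from rfl]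
              split <;> simp_all
          rw [hstep, ih]
          simp [ha, hdated]
          omega
    · have hstep : rrbStep (t, n, b) r = (t + 1, n, b) := by
        simp [rrbStep, haB, ha]
      rw [hstep, ih]
      simp [ha]
      omega

-- on dated routines A's and B's sort/min keys agree
theorem rrb_key_agree (x : List (String × String)) (hx : rrbDated x = true) :
    rrbKeyA x = rrbKeyB x := by
  unfold rrbDated at hx
  unfold rrbKeyA rrbKeyB
  rcases hd : (PySem.Dict.ofList x).get? "next_due" with _ | s
  · rw [hd] at hx; simp at hx
  · simp [PySem.Dict.getD, hd]

theorem rrb_join_one (a : String) : PySem.Str.join "" [a] = a := by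
  simp [PySem.Str.join, PySem.Chars.join, List.intercalate]

theorem rrb_join_two (a b : String) : PySem.Str.join "" [a, b] = a ++ b := by
  simp [PySem.Str.join, PySem.Chars.join, List.intercalate]

-- the body after the guards, proved equal
theorem rrb_body_eq (rts : List (List (String × String))) :
    (let active := rts.filter rrbActive
     if active.isEmpty then
       "<div class=\"empty\">" ++ PySem.Int.toStr (rts.length : Int) ++
         " routine(s) au catalogue, aucune active.</div>"
     else
       let sorted_active := PySem.List.sorted (active.filter rrbDated) rrbKeyA false
       let lines := ["<p><b>" ++ PySem.Int.toStr (active.length : Int) ++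
         "</b> routine(s) active(s) sur " ++ PySem.Int.toStr (rts.length : Int) ++
         " au catalogue.</p>"]
       let lines := match sorted_active with
         | [] => lines
         | next_r :: _ => lines ++ [rrbNextLine next_r]
       PySem.Str.join "" lines) =
    (let st := rts.foldl rrbStep (0, 0, none)
     if st.2.1 = 0 then
       "<div class=\"empty\">" ++ PySem.Int.toStr st.1 ++
         " routine(s) au catalogue, aucune active.</div>"
     else
       let html := "<p><b>" ++ PySem.Int.toStr st.2.1 ++
         "</b> routine(s) active(s) sur " ++ PySem.Int.toStr st.1 ++
         " au catalogue.</p>"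
       (st.2.2).elim html (fun b => html ++ rrbNextLine b)) := by
  have hst : rts.foldl rrbStep (0, 0, none) =
      ((rts.length : Int), ((rts.filter rrbActive).length : Int),
       ((rts.filter rrbActive).filter rrbDated).foldl (rrbMinStep rrbKeyB) none) := by
    rw [rrb_foldl_step]; simp
  have hmin : ((rts.filter rrbActive).filter rrbDated).foldl (rrbMinStep rrbKeyB) none =
      (PySem.List.sorted ((rts.filter rrbActive).filter rrbDated) rrbKeyA false).head? := by
    rw [rrb_head_sorted, rrb_min?_congr rrbKeyA rrbKeyB]
    · exact (rrb_min?_eq_foldl _ _).symm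
    · intro x hx
      exact rrb_key_agree x (List.of_mem_filter hx)
  rw [hst]
  by_cases hae : (rts.filter rrbActive).isEmpty
  · have h0 : ((rts.filter rrbActive).length : Int) = 0 := by
      rw [List.isEmpty_iff] at hae; simp [hae]
    simp only [hae, if_true, h0]
  · have h0 : ¬ ((rts.filter rrbActive).length : Int) = 0 := by
      simp [List.isEmpty_iff] at hae
      simpa using hae
    simp only [hae, if_false, h0]
    rcases hs : PySem.List.sorted ((rts.filter rrbActive).filter rrbDated) rrbKeyA false
      with _ | ⟨next_r, rest⟩
    · have : ((rts.filter rrbActive).filter rrbDated).foldl (rrbMinStep rrbKeyB) none = none := by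
        rw [hmin, hs]; rfl
      rw [List.filter_filter] at this
      simp [this, rrb_join_one]
    · have : ((rts.filter rrbActive).filter rrbDated).foldl (rrbMinStep rrbKeyB) none
          = some next_r := by
        rw [hmin, hs]; rfl
      rw [List.filter_filter] at this
      simp [this, rrb_join_two]

-- ===== VERDICT (by name: the statement is the Claim_ definition above) =====
theorem render_routines_block_spec : Claim_equal_render_routines_block := by
  intro rd _
  unfold Spec_render_routines_block
  cases rd with
  | none => rfl
  | some pairs =>
    unfold render_routines_block render_routines_block_alt
    by_cases hp : pairs.isEmpty
    · simp only [hp, Option.getD_some, Bool.true_or, if_pos]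
      exact rrbEmptyMsgB_eq.symm
    · simp only [hp, Bool.false_eq_true, if_false, Option.getD_some, Bool.false_or]
      rcases hr : (PySem.Dict.ofList pairs).get? "routines" with _ | rts
      · simp [PySem.Dict.getD, hr, rrbEmptyMsgB_eq]
      · rcases rts with _ | ⟨x, xs⟩
        · simp [PySem.Dict.getD, hr, rrbEmptyMsgB_eq]
        · have hgd : (PySem.Dict.ofList pairs).getD "routines" [] = x :: xs := by
            simp [PySem.Dict.getD, hr]
          rw [hgd]
          simp only [List.isEmpty_cons, Bool.false_eq_true, if_false]
          exact rrb_body_eq (x :: xs)
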